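-- pv_equiv track=rewrite | github.com/FlaviusMarian27/Python | lab4.py | cif_imp
-- ===== SOURCE A (Python) =====
-- def cif_imp(n):
--     c = [];
--     while ( n > 0 ):
--         cifra = n % 10;
--         if ( cifra % 2 != 0 ):
--             c.append(cifra);
--         n = n // 10;
--     return c;
-- ===== SOURCE B (Python) =====
-- def cif_imp(n):
--     if n <= 0:
--         return []
--     return [int(d) for d in reversed(str(n)) if int(d) % 2 != 0]
-- ===== Notes on version B (the rewrite author's own statement) =====
-- stated objective: idiomatic
-- what changed: B extracts the digits from the decimal string representation (reversed(str(n)) with a comprehension) instead of peeling them off arithmetically with a % / // loop.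
import Mathlib
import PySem

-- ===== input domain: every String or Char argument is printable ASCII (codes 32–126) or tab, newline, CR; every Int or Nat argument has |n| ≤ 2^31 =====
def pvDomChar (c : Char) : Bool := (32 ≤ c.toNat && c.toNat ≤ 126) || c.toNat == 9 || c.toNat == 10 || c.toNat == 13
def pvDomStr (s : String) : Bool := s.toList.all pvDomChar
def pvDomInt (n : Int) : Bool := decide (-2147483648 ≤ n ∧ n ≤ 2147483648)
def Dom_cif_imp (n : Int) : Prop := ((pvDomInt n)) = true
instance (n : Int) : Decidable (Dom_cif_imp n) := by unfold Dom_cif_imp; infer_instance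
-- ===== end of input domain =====

-- B reads the digits off the decimal string instead of a % / // loop; objective: idiomatic.
-- ===== PORT A =====
def cif_impGo (n : Int) (c : List Int) : List Int :=
  if _h : n > 0 then
    let cifra := PySem.Int.mod n 10
    cif_impGo (PySem.Int.floordiv n 10) (if PySem.Int.mod cifra 2 ≠ 0 then c ++ [cifra] else c)
  else c
termination_by n.toNat
decreasing_by
  simp only [PySem.Int.floordiv, Int.fdiv_eq_ediv]
  omega

def cif_imp (n : Int) : List Int := cif_impGo n []

-- ===== PORT B =====
-- int(d) for a single decimal-digit character d, ported by hand; exact on digit chars.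
def pvDigitVal (c : Char) : Int := (c.toNat : Int) - 48

def cif_imp_alt (n : Int) : List Int :=
  if n ≤ 0 then []
  else (((PySem.Int.toStr n).toList.reverse).filter
         (fun c => PySem.Int.mod (pvDigitVal c) 2 ≠ 0)).map pvDigitVal

-- ===== PRECONDITION & SPEC =====
def Spec_cif_imp (n : Int) (out : List Int) : Prop := out = cif_imp_alt n
instance (n : Int) (out : List Int) : Decidable (Spec_cif_imp n out) := by unfold Spec_cif_imp; infer_instance

-- ===== CLAIM (what is proved, stated in full; the proofs are below) =====
def Claim_equal_cif_imp : Prop := ∀ (n : Int), Dom_cif_imp n → Spec_cif_imp n (cif_imp n)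

-- ===== LEMMAS AND PROOFS =====

theorem pv_core_append (f : Nat) : ∀ (n : Nat) (ds : List Char), n < f →
    Nat.toDigitsCore 10 f n ds = Nat.toDigitsCore 10 f n [] ++ ds := by
  induction f with
  | zero => intro n ds h; omega
  | succ f ih =>
    intro n ds h
    simp only [Nat.toDigitsCore]
    by_cases h10 : n / 10 = 0
    · simp [h10]
    · simp only [h10, if_false]
      have hlt : n / 10 < f := by omega
      rw [ih (n / 10) (Nat.digitChar (n % 10) :: ds) hlt,
          ih (n / 10) [Nat.digitChar (n % 10)] hlt]
      simp

theorem pv_core_fuel (f : Nat) : ∀ (f' n : Nat), n < f → n < f' →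
    Nat.toDigitsCore 10 f n [] = Nat.toDigitsCore 10 f' n [] := by
  induction f with
  | zero => intro f' n h; omega
  | succ f ih =>
    intro f' n h h'
    cases f' with
    | zero => omega
    | succ f' =>
      simp only [Nat.toDigitsCore]
      by_cases h10 : n / 10 = 0
      · simp [h10]
      · simp only [h10, if_false]
        rw [pv_core_append f _ _ (by omega), pv_core_append f' _ _ (by omega),
            ih f' (n / 10) (by omega) (by omega)]

theorem pv_toDigits_step (m : Nat) (hm : 0 < m) :
    Nat.toDigits 10 m =
      (if m / 10 = 0 then [] else Nat.toDigits 10 (m / 10)) ++ [Nat.digitChar (m % 10)] := by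
  conv_lhs => rw [Nat.toDigits]; simp only [Nat.toDigitsCore]
  by_cases h10 : m / 10 = 0
  · simp [h10]
  · simp only [h10, if_false]
    rw [pv_core_append m (m / 10) _ (by omega),
        pv_core_fuel m (m / 10 + 1) (m / 10) (by omega) (by omega)]
    rfl

theorem pv_digitVal_digitChar (k : Nat) (h : k < 10) :
    pvDigitVal (Nat.digitChar k) = (k : Int) := by
  interval_cases k <;> decide

-- B's value on a positive nat, as the filtered reversed digit-char list.
def pvB (m : Nat) : List Int :=
  (((Nat.toDigits 10 m).reverse).filter
    (fun c => PySem.Int.mod (pvDigitVal c) 2 ≠ 0)).map pvDigitVal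

theorem pv_mod10 (m : Nat) : PySem.Int.mod (m : Int) 10 = ((m % 10 : Nat) : Int) := by
  simp only [PySem.Int.mod, Int.fmod_eq_emod]
  omega

theorem pv_mod2 (j : Nat) : PySem.Int.mod (j : Int) 2 = ((j % 2 : Nat) : Int) := by
  simp only [PySem.Int.mod, Int.fmod_eq_emod]
  omega

theorem pv_fdiv10 (m : Nat) : PySem.Int.floordiv (m : Int) 10 = ((m / 10 : Nat) : Int) := by
  simp only [PySem.Int.floordiv, Int.fdiv_eq_ediv]
  omega

theorem pv_go_neg (n : Int) (c : List Int) (h : ¬(n > 0)) : cif_impGo n c = c := by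
  rw [cif_impGo]
  simp [h]

theorem pv_go_acc_aux (k : Nat) : ∀ (n : Int), n.toNat ≤ k → ∀ (c : List Int),
    cif_impGo n c = c ++ cif_impGo n [] := by
  induction k with
  | zero =>
    intro n hn c
    rw [pv_go_neg n c (by omega), pv_go_neg n [] (by omega)]
    simp
  | succ k ih =>
    intro n hn c
    by_cases hpos : n > 0
    · conv_lhs => rw [cif_impGo]
      conv_rhs => rw [cif_impGo]
      simp only [dif_pos hpos]
      have hlt : (PySem.Int.floordiv n 10).toNat ≤ k := by
        simp only [PySem.Int.floordiv, Int.fdiv_eq_ediv]; omega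
      by_cases hodd : PySem.Int.mod (PySem.Int.mod n 10) 2 ≠ 0
      · rw [if_pos hodd, if_pos hodd]
        simp only [List.nil_append]
        rw [ih _ hlt, ih _ hlt [PySem.Int.mod n 10]]
        simp
      · rw [if_neg hodd, if_neg hodd, ih _ hlt]
    · rw [pv_go_neg n c hpos, pv_go_neg n [] hpos]
      simp

theorem pv_go_acc (n : Int) (c : List Int) : cif_impGo n c = c ++ cif_impGo n [] :=
  pv_go_acc_aux n.toNat n le_rfl c

theorem pv_main (m : Nat) : 0 < m → cif_impGo (m : Int) [] = pvB m := by
  induction m using Nat.strong_induction_on with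
  | _ m ih =>
    intro hm
    rw [cif_impGo]
    have hpos : (m : Int) > 0 := by exact_mod_cast hm
    simp only [dif_pos hpos]
    rw [pv_mod10 m, pv_fdiv10 m]
    have hd : m % 10 < 10 := Nat.mod_lt _ (by omega)
    unfold pvB
    rw [pv_toDigits_step m hm]
    simp only [List.reverse_append, List.reverse_cons, List.reverse_nil, List.nil_append,
      List.cons_append, List.filter_cons]
    by_cases h10 : m / 10 = 0
    · simp only [h10, if_true, List.reverse_nil, List.filter_nil]
      rw [show ((0 : Nat) : Int) = (0 : Int) from rfl, pv_go_neg 0 _ (by omega)]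
      simp only [pv_digitVal_digitChar _ hd, pv_mod2]
      by_cases ho : m % 10 % 2 = 1
      · simp [ho, pv_digitVal_digitChar _ hd]
      · have ho0 : m % 10 % 2 = 0 := by omega
        simp [ho0]
    · simp only [h10, if_false]
      rw [pv_go_acc, ih (m / 10) (by omega) (by omega)]
      unfold pvB
      simp only [pv_digitVal_digitChar _ hd, pv_mod2]
      by_cases ho : m % 10 % 2 = 1
      · simp [ho, pv_digitVal_digitChar _ hd]
      · have ho0 : m % 10 % 2 = 0 := by omega
        simp [ho0]

-- ===== VERDICT (by name: the statement is the Claim_ definition above) =====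
theorem cif_imp_spec : Claim_equal_cif_imp := by
  intro n _
  unfold Spec_cif_imp cif_imp cif_imp_alt
  by_cases hn : n ≤ 0
  · rw [pv_go_neg n [] (by omega), if_pos hn]
  · simp only [hn, if_false]
    have hm : 0 < n.toNat := by omega
    have hts : (PySem.Int.toStr n).toList = Nat.toDigits 10 n.toNat := by
      rw [PySem.Int.toStr, String.toList_ofList, PySem.Int.toChars,
          if_neg (show ¬(n < 0) from by omega)]
    rw [hts]
    have hcast : ((n.toNat : Nat) : Int) = n := by omega
    calc cif_impGo n [] = cif_impGo ((n.toNat : Nat) : Int) [] := by rw [hcast]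
      _ = pvB n.toNat := pv_main n.toNat hm
      _ = _ := rfl
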